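-- pv_equiv track=rewrite | github.com/DaniilPanasenko/AdvancedSnakeGame | library.py | concat_array_to_right
-- ===== SOURCE A (Python) =====
-- def append_row(arr, width):
--     internal_arr = []
--     for j in range(width):
--         internal_arr.append(0)
--     arr.append(internal_arr)
--     return arr
--
-- def concat_array_to_right(arr1, arr2):
--     if len(arr1) < len(arr2):
--         for i in range(len(arr2) - len(arr1)):
--             arr1 = append_row(arr1, len(arr1[0]))
--     for i in range(len(arr2)):
--         for j in range(len(arr2[i])):
--             arr1[i].append(arr2[i][j])
--     return arr1
-- ===== SOURCE B (Python) =====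
-- def concat_array_to_right(arr1, arr2):
--     # Recursive co-traversal: consume both matrices head-by-head, building the
--     # result back-to-front on return (pure; equivalence is about the return value,
--     # A mutates arr1 in place).
--     w = len(arr1[0]) if arr1 else 0
--
--     def go(xs, ys):
--         if not ys:
--             return xs
--         if xs:
--             return [xs[0] + ys[0]] + go(xs[1:], ys[1:])
--         return [[0] * w + ys[0]] + go([], ys[1:])
--
--     return go(arr1, arr2)
-- ===== Notes on version B (the rewrite author's own statement) =====
-- stated objective: alternative
-- what changed: Replaces A's three staged mutation loops (zero-row padding via append_row, then a nested index loop appending into each row) with a single recursive co-traversal that consumes both matrices head-by-head and rebuilds the result purely on return; A mutates arr1 in place, B does not (return-value equivalence).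
-- outside the precondition, e.g. on concat_array_to_right([], [[1]]): A raises IndexError, B returns [[1]]
import Mathlib
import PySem

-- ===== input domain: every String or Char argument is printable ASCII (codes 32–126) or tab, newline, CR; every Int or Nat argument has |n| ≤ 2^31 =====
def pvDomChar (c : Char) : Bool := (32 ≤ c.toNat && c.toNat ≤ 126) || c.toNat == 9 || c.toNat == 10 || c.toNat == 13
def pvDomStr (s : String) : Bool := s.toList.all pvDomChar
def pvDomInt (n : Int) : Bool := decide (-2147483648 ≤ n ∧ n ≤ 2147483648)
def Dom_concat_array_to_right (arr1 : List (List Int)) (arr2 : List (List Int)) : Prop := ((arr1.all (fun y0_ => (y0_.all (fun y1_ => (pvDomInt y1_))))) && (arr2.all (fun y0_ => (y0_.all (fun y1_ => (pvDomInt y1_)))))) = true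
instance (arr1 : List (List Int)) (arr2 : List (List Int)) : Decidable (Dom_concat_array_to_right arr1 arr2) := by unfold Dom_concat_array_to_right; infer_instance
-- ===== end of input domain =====

-- B replaces A's staged in-place pad/append loops by a pure recursive co-traversal of the two
-- matrices; the equivalence is about the RETURN value only (A mutates arr1 in place, B does not).

-- ===== PORT A =====
def append_row (arr : List (List Int)) (width : Nat) : List (List Int) :=
  let internal_arr := (List.range width).foldl (fun acc _ => acc ++ [(0 : Int)]) []
  arr ++ [internal_arr]

def concat_array_to_right (arr1 : List (List Int)) (arr2 : List (List Int)) : List (List Int) :=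
  let a1 :=
    if arr1.length < arr2.length then
      (List.range (arr2.length - arr1.length)).foldl
        (fun a _ => append_row a ((PySem.List.pyGet? a 0).getD []).length) arr1
    else arr1
  (List.range arr2.length).foldl
    (fun a i =>
      (arr2.getD i []).foldl (fun a x => a.set i ((a.getD i []) ++ [x])) a) a1

-- ===== PORT B =====
-- helper 'go' of Source B: consume both lists head-by-head, rebuilding on return
def pvGo (w : Nat) (xs : List (List Int)) (ys : List (List Int)) : List (List Int) :=
  match xs, ys with
  | xs, [] => xs
  | x :: xs, y :: ys => (x ++ y) :: pvGo w xs ys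
  | [], y :: ys => (List.replicate w 0 ++ y) :: pvGo w [] ys

def concat_array_to_right_alt (arr1 : List (List Int)) (arr2 : List (List Int)) : List (List Int) :=
  let w := if arr1 ≠ [] then (arr1.headD []).length else 0
  pvGo w arr1 arr2

-- ===== PRECONDITION & SPEC =====
-- Pre_ excludes exactly the inputs where A raises IndexError: arr1 empty but arr2 non-empty
-- (A reads len(arr1[0]) to build the padding rows).
def Pre_concat_array_to_right (arr1 : List (List Int)) (arr2 : List (List Int)) : Prop :=
  arr1 ≠ [] ∨ arr2 = []
instance (arr1 : List (List Int)) (arr2 : List (List Int)) : Decidable (Pre_concat_array_to_right arr1 arr2) := by unfold Pre_concat_array_to_right; infer_instance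

def pvWitness_concat_array_to_right : List (List Int) × List (List Int) :=
  ([[1, 2]], [[3], [4]])

def Spec_concat_array_to_right (arr1 : List (List Int)) (arr2 : List (List Int)) (out : List (List Int)) : Prop := out = concat_array_to_right_alt arr1 arr2
instance (arr1 : List (List Int)) (arr2 : List (List Int)) (out : List (List Int)) : Decidable (Spec_concat_array_to_right arr1 arr2 out) := by unfold Spec_concat_array_to_right; infer_instance

-- ===== CLAIM (what is proved, stated in full; the proofs are below) =====
def Claim_equal_concat_array_to_right : Prop := ∀ (arr1 : List (List Int)) (arr2 : List (List Int)), Dom_concat_array_to_right arr1 arr2 → Pre_concat_array_to_right arr1 arr2 → Spec_concat_array_to_right arr1 arr2 (concat_array_to_right arr1 arr2)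

-- ===== LEMMAS AND PROOFS =====

-- Loop body of A's second (outer) loop, named for readability in the lemmas.
def pvStepA (arr2 : List (List Int)) (a : List (List Int)) (i : Nat) : List (List Int) :=
  (arr2.getD i []).foldl (fun a x => a.set i ((a.getD i []) ++ [x])) a

theorem pv_pad_eq (arr1 : List (List Int)) (h : arr1 ≠ []) (k : Nat) :
    (List.range k).foldl (fun a _ => append_row a ((PySem.List.pyGet? a 0).getD []).length) arr1
      = arr1 ++ List.replicate k (List.replicate (arr1.headD []).length 0) := by
  induction k with
  | zero => simp
  | succ k ih =>
      rw [List.range_succ, List.foldl_append, ih]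
      obtain ⟨x, xs, rfl⟩ := List.exists_cons_of_ne_nil h
      simp [append_row, PySem.List.pyGet?_zero_cons,
        List.replicate_succ' (n := k), List.append_assoc]

theorem pv_inner_eq (i : Nat) (row : List Int) (a : List (List Int)) (h : i < a.length) :
    row.foldl (fun a x => a.set i ((a.getD i []) ++ [x])) a = a.set i ((a.getD i []) ++ row) := by
  induction row generalizing a with
  | nil =>
      simp only [List.foldl_nil, List.append_nil, List.getD_eq_getElem?_getD]
      rw [List.getElem?_eq_getElem h]
      simp
  | cons x row ih =>
      rw [List.foldl_cons, ih _ (by simpa using h), List.set_set]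
      have : (a.set i (a.getD i [] ++ [x])).getD i [] = a.getD i [] ++ [x] := by
        simp [List.getD_eq_getElem?_getD, h]
      rw [this, List.append_assoc]; simp

theorem pv_outer_char (arr2 : List (List Int)) (n : Nat) (a : List (List Int)) (h : n ≤ a.length) :
    ((List.range n).foldl (pvStepA arr2) a).length = a.length ∧
      ∀ j : Nat, ((List.range n).foldl (pvStepA arr2) a)[j]? =
        if j < n then (a[j]?.map (· ++ arr2.getD j [])) else a[j]? := by
  induction n with
  | zero => simp
  | succ n ih =>
      obtain ⟨hlen, hel⟩ := ih (Nat.le_of_succ_le h)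
      rw [List.range_succ, List.foldl_append, List.foldl_cons, List.foldl_nil]
      have hn : n < ((List.range n).foldl (pvStepA arr2) a).length := by omega
      have hstep : pvStepA arr2 ((List.range n).foldl (pvStepA arr2) a) n =
          ((List.range n).foldl (pvStepA arr2) a).set n
            ((((List.range n).foldl (pvStepA arr2) a).getD n []) ++ arr2.getD n []) := by
        exact pv_inner_eq n _ _ hn
      rw [hstep]
      constructor
      · simpa using hlen
      · intro j
        have hgd : (((List.range n).foldl (pvStepA arr2) a).getD n []) = a.getD n [] := by
          simp [List.getD_eq_getElem?_getD, hel n]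
        rw [List.getElem?_set, hgd]
        by_cases hj : j < n
        · simp [Nat.ne_of_gt hj, hel j, hj, Nat.lt_succ_of_lt hj]
        · by_cases hjn : j = n
          · subst hjn
            have hja : j < a.length := by omega
            simp [hn, List.getD_eq_getElem?_getD, List.getElem?_eq_getElem hja]
          · have h1 : ¬ j < n + 1 := by omega
            have hne : n ≠ j := fun hh => hjn hh.symm
            simp [hne, hel j, hj, h1]

-- element-wise description of B's co-traversal
theorem pv_go_getElem? (w : Nat) (xs ys : List (List Int)) (j : Nat) :
    (pvGo w xs ys)[j]? =
      if j < xs.length then xs[j]?.map (· ++ ys.getD j [])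
      else ys[j]?.map (fun y => List.replicate w 0 ++ y) := by
  induction ys generalizing xs j with
  | nil =>
      cases xs with
      | nil => simp [pvGo]
      | cons x xs =>
          by_cases hj : j < (x :: xs).length
          · rw [pvGo]
            rw [if_pos hj, List.getElem?_eq_getElem hj]
            simp
          · rw [pvGo]
            rw [if_neg hj, List.getElem?_eq_none_iff.mpr (by simp at hj ⊢; omega),
              List.getElem?_eq_none_iff.mpr (by simp)]
            rfl
  | cons y ys ih =>
      cases xs with
      | nil =>
          cases j with
          | zero => simp [pvGo]
          | succ j =>
              rw [pvGo]
              simpa using ih [] j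
      | cons x xs =>
          cases j with
          | zero => simp [pvGo]
          | succ j =>
              rw [pvGo]
              have := ih xs j
              simpa [Nat.succ_lt_succ_iff] using this

-- ===== VERDICT (by name: the statement is the Claim_ definition above) =====
theorem concat_array_to_right_spec : Claim_equal_concat_array_to_right := by
  intro arr1 arr2 _ hpre
  unfold Spec_concat_array_to_right concat_array_to_right concat_array_to_right_alt
  by_cases hlt : arr1.length < arr2.length
  · have hne : arr1 ≠ [] := by
      rcases hpre with h | h
      · exact h
      · exfalso; rw [h] at hlt; simp at hlt
    rw [if_pos hlt, pv_pad_eq arr1 hne]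
    set w := (arr1.headD []).length with hw
    set a := arr1 ++ List.replicate (arr2.length - arr1.length) (List.replicate w 0) with ha
    have hlen : a.length = arr2.length := by
      simp [ha]; omega
    obtain ⟨_, hel⟩ := pv_outer_char arr2 arr2.length a (by omega)
    apply List.ext_getElem?
    intro j
    show ((List.range arr2.length).foldl (pvStepA arr2) a)[j]? = _
    rw [hel j]
    simp only [if_pos hne]
    rw [pv_go_getElem?]
    by_cases h1 : j < arr1.length
    · have h2 : j < arr2.length := by omega
      have : a[j]? = arr1[j]? := by
        rw [ha, List.getElem?_append_left h1]
      simp [h2, h1, this]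
    · by_cases h2 : j < arr2.length
      · have : a[j]? = some (List.replicate w 0) := by
          rw [ha, List.getElem?_append_right (by omega)]
          rw [List.getElem?_replicate]
          simp; omega
        have h3 : j < arr2.length := h2
        have : a[j]?.map (· ++ arr2.getD j []) =
            some (List.replicate w 0 ++ arr2.getD j []) := by rw [this]; rfl
        rw [if_pos h2, this, if_neg h1]
        rw [List.getElem?_eq_getElem h3]
        simp [List.getD_eq_getElem?_getD, List.getElem?_eq_getElem h3]
      · have haj : a[j]? = none := List.getElem?_eq_none_iff.mpr (by omega)
        have h2' : arr2[j]? = none := List.getElem?_eq_none_iff.mpr (by omega)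
        simp [h2, h1, haj]
  · rw [if_neg hlt]
    have hle : arr2.length ≤ arr1.length := by omega
    obtain ⟨_, hel⟩ := pv_outer_char arr2 arr2.length arr1 hle
    apply List.ext_getElem?
    intro j
    show ((List.range arr2.length).foldl (pvStepA arr2) arr1)[j]? = _
    rw [hel j, pv_go_getElem?]
    by_cases h2 : j < arr2.length
    · simp [h2, show j < arr1.length by omega]
    · by_cases h1 : j < arr1.length
      · have hg : arr2.getD j [] = [] := by
          rw [List.getD_eq_getElem?_getD, List.getElem?_eq_none_iff.mpr (by omega)]
          rfl
        simp [h2, h1]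
      · have ha1 : arr1[j]? = none := List.getElem?_eq_none_iff.mpr (by omega)
        have ha2 : arr2[j]? = none := List.getElem?_eq_none_iff.mpr (by omega)
        simp [h2, h1]
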